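-- pv_equiv track=rewrite | github.com/CogComp/cogcomp-nlpy | ccg_nlpy/core/text_annotation.py | _extract_char_offset
-- ===== SOURCE A (Python) =====
-- def _extract_char_offset(sentence, tokens):
--     """
--     a function to extract char offsets given tokens and raw string
--     Originally implemented in
--     https://github.com/CogComp/cogcomp-nlp/blob/12cf80eabc92fe69ff7a53709f6d6e91fb00687d/core-utilities/src/main/java/edu/illinois/cs/cogcomp/core/utilities/TokenUtils.java#L27
--     """
--     offsets = []
--
--     tokenId = 0
--     characterId = 0
--
--     tokenCharacterStart = 0
--     tokenLength = 0
--
--     while (characterId < len(sentence)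
--              and sentence[characterId].isspace()):
--         characterId = characterId + 1
--
--     while (characterId < len(sentence)):
--         if (tokenLength == len(tokens[tokenId])):
--             offsets.append((tokenCharacterStart, characterId))
--
--             while (characterId < len(sentence) and sentence[characterId].isspace()):
--                 characterId = characterId + 1
--
--             tokenCharacterStart = characterId
--             tokenLength = 0
--             tokenId = tokenId + 1
--
--         else:
--             assert sentence[characterId] == tokens[tokenId][tokenLength], sentence[characterId] + " expected, found " + tokens[tokenId][tokenLength] + " instead in sentence: " + sentence;
--             tokenLength = tokenLength + 1
--             characterId = characterId + 1
--
--     if (characterId == len(sentence) and len(offsets) == len(tokens) - 1):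
--         offsets.append((tokenCharacterStart, len(sentence)))
--
--     assert len(offsets) == len(tokens), offsets
--
--     return offsets
-- ===== SOURCE B (Python) =====
-- def _extract_char_offset(sentence, tokens):
--     """Token-level re-implementation: one pass over the token list, comparing each
--     token against a slice of the sentence, instead of A's per-character state
--     machine; reproduces A's span bookkeeping (spans start at the position stored
--     after the previous token's trailing whitespace, 0 for the first token, and a
--     token reaching the end of the sentence is accepted by prefix if it is last)."""
--     n = len(sentence)
--     pos = 0
--     while pos < n and sentence[pos].isspace():
--         pos += 1
--     offsets = []
--     start = 0
--     for i, tok in enumerate(tokens):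
--         end = pos + len(tok)
--         if end >= n:
--             # the sentence ends inside (or exactly at the end of) this token
--             assert sentence[pos:] == tok[:n - pos], (sentence, tok)
--             assert i == len(tokens) - 1, offsets
--             offsets.append((start, n))
--             pos = n
--         else:
--             assert sentence[pos:end] == tok, (sentence, tok)
--             offsets.append((start, end))
--             pos = end
--             while pos < n and sentence[pos].isspace():
--                 pos += 1
--             start = pos
--     assert pos == n, offsets
--     return offsets
-- ===== Notes on version B (the rewrite author's own statement) =====
-- stated objective: alternative
-- what changed: B replaces A's per-character state machine (tokenId/tokenLength counters plus a special end-of-string append block) by a single loop over the tokens that slice-compares each token against the sentence, skips inter-token whitespace, and handles a token reaching the end of the sentence as a prefix match for the last token.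
import Mathlib
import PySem

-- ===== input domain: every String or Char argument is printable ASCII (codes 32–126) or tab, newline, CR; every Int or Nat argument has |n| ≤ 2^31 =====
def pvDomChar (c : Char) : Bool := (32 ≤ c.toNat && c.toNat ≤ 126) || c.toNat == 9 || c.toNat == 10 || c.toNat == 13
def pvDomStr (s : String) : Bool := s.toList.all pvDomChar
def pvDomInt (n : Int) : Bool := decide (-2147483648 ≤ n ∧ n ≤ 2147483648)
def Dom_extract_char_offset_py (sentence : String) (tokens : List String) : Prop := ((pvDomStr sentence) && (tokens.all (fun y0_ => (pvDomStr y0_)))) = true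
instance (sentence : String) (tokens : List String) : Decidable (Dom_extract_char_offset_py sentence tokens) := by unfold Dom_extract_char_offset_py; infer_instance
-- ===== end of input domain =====

-- B replaces A's per-character state machine (and its special end-of-string append block) by one token-level loop
-- with slice comparisons; same cost, plainer structure.

-- ===== PORT A =====
-- A's whitespace-skip loop: `while characterId < len(sentence) and sentence[characterId].isspace(): characterId += 1`
def aSkipWs (cs : List Char) (i : Nat) : Nat :=
  if h : i < cs.length then
    if PySem.Chars.isspace cs[i] then aSkipWs cs (i + 1) else i
  else i
termination_by cs.length - i

-- needed by aLoop's termination proof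
theorem le_aSkipWs (cs : List Char) (i : Nat) : i ≤ aSkipWs cs i := by
  unfold aSkipWs
  split
  · split
    · exact le_trans (Nat.le_succ i) (le_aSkipWs cs (i + 1))
    · exact le_refl i
  · exact le_refl i
termination_by cs.length - i

-- A's main `while characterId < len(sentence)` loop; `none` = the Python raises
-- (IndexError on tokens[tokenId] / tokens[tokenId][tokenLength], AssertionError on mismatch or the final length assert)
def aLoop (cs : List Char) (tokens : List String) (offsets : List (Int × Int))
    (tokenId charId start tokLen : Nat) : Option (List (Int × Int)) :=
  if h : charId < cs.length then
    match htok : tokens[tokenId]? with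
    | none => none
    | some tok =>
      if tokLen = tok.toList.length then
        let offsets' := offsets ++ [((start : Int), (charId : Int))]
        let c' := aSkipWs cs charId
        aLoop cs tokens offsets' (tokenId + 1) c' c' 0
      else
        match tok.toList[tokLen]? with
        | none => none
        | some tc =>
          if cs[charId] = tc then
            aLoop cs tokens offsets tokenId (charId + 1) start (tokLen + 1)
          else none
  else
    let offsets' :=
      if charId = cs.length ∧ (offsets.length : Int) = (tokens.length : Int) - 1 then
        offsets ++ [((start : Int), (cs.length : Int))]
      else offsets
    if offsets'.length = tokens.length then some offsets' else none
termination_by 2 * (cs.length - charId) + (tokens.length - tokenId)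
decreasing_by
  · have h1 : tokenId < tokens.length := by
      have := List.getElem?_eq_some_iff.mp htok
      exact this.1
    have h2 : charId ≤ aSkipWs cs charId := le_aSkipWs cs charId
    omega
  · omega

def extract_char_offset_py (sentence : String) (tokens : List String) : List (Int × Int) :=
  let cs := sentence.toList
  let c0 := aSkipWs cs 0
  (aLoop cs tokens [] 0 c0 0 0).getD []

-- ===== PORT B =====
-- B's whitespace-skip loop (Source B has this `while` twice)
def bSkipWs (cs : List Char) (i : Nat) : Nat :=
  if h : i < cs.length then
    if PySem.Chars.isspace cs[i] then bSkipWs cs (i + 1) else i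
  else i
termination_by cs.length - i

-- B's `for i, tok in enumerate(tokens)` loop; Source B's `i == len(tokens) - 1` is `ts = []` in the structural recursion,
-- its slices sentence[pos:end], sentence[pos:], tok[:n - pos] (all bounds ≥ 0) are drop/take; `none` = an assert fails
def bGo (cs : List Char) (toks : List String) (pos start : Nat) (acc : List (Int × Int)) :
    Option (List (Int × Int)) :=
  match toks with
  | [] => if pos = cs.length then some acc else none
  | t :: ts =>
    if cs.length ≤ pos + t.toList.length then
      -- the sentence ends inside (or exactly at the end of) this token
      if cs.drop pos = t.toList.take (cs.length - pos) then
        if ts.isEmpty then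
          bGo cs ts cs.length start (acc ++ [((start : Int), (cs.length : Int))])
        else none
      else none
    else
      if (cs.drop pos).take t.toList.length = t.toList then
        bGo cs ts (bSkipWs cs (pos + t.toList.length)) (bSkipWs cs (pos + t.toList.length))
          (acc ++ [((start : Int), ((pos + t.toList.length : Nat) : Int))])
      else none

def extract_char_offset_py_alt (sentence : String) (tokens : List String) : List (Int × Int) :=
  let cs := sentence.toList
  (bGo cs tokens (bSkipWs cs 0) 0 []).getD []

-- ===== PRECONDITION & SPEC =====
-- Pre_ = exactly the inputs on which A returns normally: after leading whitespace the sentence reads as the tokens in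
-- order separated by whitespace, except that the last token may be cut off by the end of the sentence (A's final append
-- block accepts any prefix of the last token that reaches the end); everywhere else A raises IndexError/AssertionError.
def preCheck (cs : List Char) : List String → Bool
  | [] => cs.isEmpty
  | t :: ts =>
    if t.toList.length < cs.length then
      decide (cs.take t.toList.length = t.toList) &&
        preCheck ((cs.drop t.toList.length).dropWhile PySem.Chars.isspace) ts
    else
      decide (cs = t.toList.take cs.length) && ts.isEmpty

def Pre_extract_char_offset_py (sentence : String) (tokens : List String) : Prop :=
  preCheck (sentence.toList.dropWhile PySem.Chars.isspace) tokens = true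

instance (sentence : String) (tokens : List String) : Decidable (Pre_extract_char_offset_py sentence tokens) := by
  unfold Pre_extract_char_offset_py; infer_instance

def pvWitness_extract_char_offset_py : String × List String := (" a  b ", ["a", "b"])

def Spec_extract_char_offset_py (sentence : String) (tokens : List String) (out : List (Int × Int)) : Prop :=
  out = extract_char_offset_py_alt sentence tokens

instance (sentence : String) (tokens : List String) (out : List (Int × Int)) : Decidable (Spec_extract_char_offset_py sentence tokens out) := by
  unfold Spec_extract_char_offset_py; infer_instance

-- ===== CLAIM (what is proved, stated in full; the proofs are below) =====
def Claim_equal_extract_char_offset_py : Prop := ∀ (sentence : String) (tokens : List String), Dom_extract_char_offset_py sentence tokens → Pre_extract_char_offset_py sentence tokens → Spec_extract_char_offset_py sentence tokens (extract_char_offset_py sentence tokens)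

-- ===== LEMMAS AND PROOFS =====

theorem aSkipWs_le (cs : List Char) (i : Nat) (h : i ≤ cs.length) : aSkipWs cs i ≤ cs.length := by
  unfold aSkipWs
  split
  · split
    · exact aSkipWs_le cs (i + 1) (by omega)
    · exact h
  · exact h
termination_by cs.length - i

theorem drop_aSkipWs (cs : List Char) (i : Nat) :
    cs.drop (aSkipWs cs i) = (cs.drop i).dropWhile PySem.Chars.isspace := by
  unfold aSkipWs
  split
  · rename_i h
    rw [List.drop_eq_getElem_cons h]
    split
    · rename_i hws
      rw [List.dropWhile_cons_of_pos (by simpa using hws)]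
      exact drop_aSkipWs cs (i + 1)
    · rename_i hws
      rw [List.dropWhile_cons_of_neg (by simpa using hws)]
      exact List.drop_eq_getElem_cons h
  · rename_i h
    simp [List.drop_eq_nil_of_le (by omega : cs.length ≤ i)]
termination_by cs.length - i

theorem bSkipWs_eq (cs : List Char) (i : Nat) : bSkipWs cs i = aSkipWs cs i := by
  unfold bSkipWs aSkipWs
  split
  · split
    · exact bSkipWs_eq cs (i + 1)
    · rfl
  · rfl
termination_by cs.length - i

-- A consumes the next u.length characters of the current token one comparison at a time
theorem aConsume (cs : List Char) (tokens : List String) (acc : List (Int × Int))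
    (tid : Nat) (t : String) (htok : tokens[tid]? = some t) :
    ∀ (u : List Char) (tl cid start : Nat), (t.toList.drop tl).take u.length = u →
      (cs.drop cid).take u.length = u →
      aLoop cs tokens acc tid cid start tl = aLoop cs tokens acc tid (cid + u.length) start (tl + u.length) := by
  intro u
  induction u with
  | nil => intro tl cid start _ _; simp
  | cons c u' ihu =>
    intro tl cid start hdrop htake
    have hcid : cid < cs.length := by
      by_contra hge
      rw [List.drop_eq_nil_of_le (by omega)] at htake
      simp at htake
    have htl : tl < t.toList.length := by
      by_contra hge
      rw [List.drop_eq_nil_of_le (by omega)] at hdrop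
      simp at hdrop
    rw [List.drop_eq_getElem_cons hcid] at htake
    rw [List.length_cons, List.take_succ_cons] at htake
    obtain ⟨hc, htake'⟩ : cs[cid] = c ∧ (cs.drop (cid + 1)).take u'.length = u' :=
      ⟨List.head_eq_of_cons_eq htake, List.tail_eq_of_cons_eq htake⟩
    rw [List.drop_eq_getElem_cons htl] at hdrop
    rw [List.length_cons, List.take_succ_cons] at hdrop
    obtain ⟨htc, hdrop'⟩ : t.toList[tl] = c ∧ (t.toList.drop (tl + 1)).take u'.length = u' :=
      ⟨List.head_eq_of_cons_eq hdrop, List.tail_eq_of_cons_eq hdrop⟩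
    have hget : t.toList[tl]? = some c := by
      rw [List.getElem?_eq_getElem htl, htc]
    conv_lhs => rw [aLoop]
    rw [dif_pos hcid, htok]
    dsimp only
    rw [if_neg (show ¬ tl = t.toList.length by omega)]
    rw [hget]
    dsimp only
    rw [if_pos hc]
    have := ihu (tl + 1) (cid + 1) start hdrop' htake'
    rw [this]
    have e1 : cid + 1 + u'.length = cid + (u'.length + 1) := by omega
    have e2 : tl + 1 + u'.length = tl + (u'.length + 1) := by omega
    rw [e1, e2]
    simp

-- the loop invariant: at a token boundary A's remaining run equals B's remaining run
theorem aMain (cs : List Char) (tokens : List String) :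
    ∀ (rest : List String) (tid pos start : Nat) (acc : List (Int × Int)),
      tokens.drop tid = rest → acc.length = tid → tid ≤ tokens.length → pos ≤ cs.length →
      preCheck (cs.drop pos) rest = true →
      aLoop cs tokens acc tid pos start 0 = bGo cs rest pos start acc := by
  intro rest
  induction rest with
  | nil =>
    intro tid pos start acc hdrop hacc htid hpos hpre
    simp only [preCheck, List.isEmpty_iff] at hpre
    have hpe : pos = cs.length := by
      have := congrArg List.length hpre
      simp at this
      omega
    have hlen : tid = tokens.length := by
      have := congrArg List.length hdrop
      simp at this
      omega
    have hc1 : ¬(pos = cs.length ∧ (acc.length : Int) = (tokens.length : Int) - 1) := by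
      rintro ⟨-, h2⟩
      rw [hacc, hlen] at h2
      omega
    have hc2 : acc.length = tokens.length := by rw [hacc, hlen]
    rw [aLoop, dif_neg (by omega)]
    rw [if_neg hc1, if_pos hc2]
    simp [bGo, hpe]
  | cons t ts ih =>
    intro tid pos start acc hdrop hacc htid hpos hpre
    have htok : tokens[tid]? = some t := by
      rw [← Nat.add_zero tid, ← List.getElem?_drop, hdrop]
      rfl
    have hdrop1 : tokens.drop (tid + 1) = ts := by
      rw [← List.tail_drop, hdrop]
      rfl
    have htidlt : tid < tokens.length := (List.getElem?_eq_some_iff.mp htok).1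
    have he : t.toList.length = t.length := by simp
    by_cases hcase : t.toList.length < (cs.drop pos).length
    · -- the token ends strictly before the end of the sentence
      rw [preCheck, if_pos hcase] at hpre
      simp only [Bool.and_eq_true, decide_eq_true_eq] at hpre
      obtain ⟨htake, hrest⟩ := hpre
      have hendlt : pos + t.toList.length < cs.length := by
        simp [List.length_drop] at hcase
        omega
      have hcons := aConsume cs tokens acc tid t htok t.toList 0 pos start
        (by simp) (by simpa using htake)
      rw [Nat.zero_add] at hcons
      rw [hcons]
      rw [aLoop, dif_pos hendlt, htok]
      dsimp only
      rw [if_pos rfl]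
      have hrec := ih (tid + 1) (aSkipWs cs (pos + t.toList.length)) (aSkipWs cs (pos + t.toList.length))
        (acc ++ [((start : Int), ((pos + t.toList.length : Nat) : Int))]) hdrop1
        (by simp [hacc]) (by omega) (aSkipWs_le cs _ (by omega))
        (by rw [drop_aSkipWs]
            rw [List.drop_drop] at hrest
            simpa [Nat.add_comm] using hrest)
      rw [hrec]
      simp only [bGo, if_neg (show ¬ cs.length ≤ pos + t.toList.length by omega), if_pos htake]
      rw [bSkipWs_eq]
    · -- the sentence ends inside (or exactly at the end of) this token
      rw [preCheck, if_neg hcase] at hpre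
      simp only [Bool.and_eq_true, decide_eq_true_eq, List.isEmpty_iff] at hpre
      obtain ⟨hrem, hts⟩ := hpre
      subst hts
      have hm : (cs.drop pos).length = cs.length - pos := by simp
      have hle : cs.length ≤ pos + t.toList.length := by omega
      have hulen : (t.toList.take (cs.drop pos).length).length = (cs.drop pos).length := by
        simp [List.length_take]
        omega
      have hcons := aConsume cs tokens acc tid t htok (t.toList.take (cs.drop pos).length)
        0 pos start
        (by rw [List.drop_zero, hulen])
        (by rw [hulen, List.take_length]; exact hrem)
      rw [Nat.zero_add, hulen, hm] at hcons
      have hposend : pos + (cs.length - pos) = cs.length := by omega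
      rw [hposend] at hcons
      rw [hcons]
      have hlen1 : tokens.length = tid + 1 := by
        have := congrArg List.length hdrop
        simp at this
        omega
      rw [aLoop, dif_neg (by omega)]
      rw [if_pos (show cs.length = cs.length ∧ (acc.length : Int) = (tokens.length : Int) - 1 from
        ⟨rfl, by rw [hacc, hlen1]; push_cast; ring⟩)]
      rw [if_pos (show (acc ++ [((start : Int), (cs.length : Int))]).length = tokens.length from by
        simp [hacc, hlen1])]
      rw [bGo, if_pos hle, if_pos (by rw [← hm]; exact hrem)]
      simp [bGo]

-- ===== VERDICT (by name: the statement is the Claim_ definition above) =====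
theorem extract_char_offset_py_spec : Claim_equal_extract_char_offset_py := by
  intro s toks hDom hPre
  unfold Pre_extract_char_offset_py at hPre
  unfold Spec_extract_char_offset_py extract_char_offset_py extract_char_offset_py_alt
  dsimp only
  rw [bSkipWs_eq]
  rw [aMain s.toList toks toks 0 (aSkipWs s.toList 0) 0 [] rfl rfl (by simp)
    (aSkipWs_le s.toList 0 (Nat.zero_le _))
    (by rw [drop_aSkipWs]; simpa using hPre)]
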